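-- pv_equiv track=rewrite | github.com/jcolinpatrick/kryptos | scripts/e_grille_16_t_extract_scoring.py | try_as_permutation
-- ===== SOURCE A (Python) =====
-- def try_as_permutation(extract, k4, method="rank"):
--     """Try using the extract letters as a permutation index to reorder K4."""
--     if len(extract) != len(k4):
--         return None
--
--     if method == "rank":
--         # Rank letters: (letter_value, position) → stable sort
--         indexed = [(ord(c) - ord('A'), i) for i, c in enumerate(extract)]
--         perm = sorted(range(len(extract)), key=lambda i: indexed[i])
--         return ''.join(k4[p] for p in perm)
--     elif method == "rank_reverse":
--         indexed = [(ord(c) - ord('A'), i) for i, c in enumerate(extract)]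
--         perm = sorted(range(len(extract)), key=lambda i: indexed[i])
--         inv_perm = [0] * len(perm)
--         for i, p in enumerate(perm):
--             inv_perm[p] = i
--         return ''.join(k4[inv_perm[i]] for i in range(len(k4)))
--     return None
-- ===== SOURCE B (Python) =====
-- def try_as_permutation(extract, k4, method="rank"):
--     """Reorder K4 via the stable argsort of the extract's letter ranks,
--     computed by gathering positions value-by-value instead of sorting indices."""
--     if len(extract) != len(k4):
--         return None
--     if method != "rank" and method != "rank_reverse":
--         return None
--     vals = [ord(c) - ord('A') for c in extract]
--     perm = []
--     for v in sorted(set(vals)):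
--         perm.extend(i for i in range(len(vals)) if vals[i] == v)
--     if method == "rank":
--         return ''.join(k4[p] for p in perm)
--     inv_perm = [0] * len(perm)
--     for i, p in enumerate(perm):
--         inv_perm[p] = i
--     return ''.join(k4[inv_perm[i]] for i in range(len(k4)))
-- ===== Notes on version B (the rewrite author's own statement) =====
-- stated objective: alternative
-- what changed: A argsorts the index list with a stable sort on the tuple key (letter value, position); B never sorts indices: it scans the extract once into letter-rank values, then iterates over the sorted distinct ranks and gathers, for each rank, the positions carrying it, concatenating the groups to obtain the same stable argsort.
import Mathlib
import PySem

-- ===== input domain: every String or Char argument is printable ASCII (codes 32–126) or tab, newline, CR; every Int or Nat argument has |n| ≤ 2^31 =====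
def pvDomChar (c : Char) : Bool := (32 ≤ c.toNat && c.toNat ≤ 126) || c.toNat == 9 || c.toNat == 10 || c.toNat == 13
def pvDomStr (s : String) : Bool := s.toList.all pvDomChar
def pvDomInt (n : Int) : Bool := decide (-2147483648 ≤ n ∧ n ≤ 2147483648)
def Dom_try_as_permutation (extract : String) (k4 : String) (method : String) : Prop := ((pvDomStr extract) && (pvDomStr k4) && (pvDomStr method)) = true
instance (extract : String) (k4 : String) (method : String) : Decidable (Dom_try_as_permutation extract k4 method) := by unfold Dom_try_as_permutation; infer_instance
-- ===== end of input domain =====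

-- B replaces A's tuple-keyed argsort by a gather: enumerate the distinct letter ranks in
-- increasing order and collect the positions carrying each rank (objective: alternative).

-- ===== PORT A =====
def try_as_permutation (extract : String) (k4 : String) (method : String) : Option String :=
  if PySem.Str.len extract ≠ PySem.Str.len k4 then none
  else if method = "rank" then
    let indexed := (PySem.List.enumerate extract.toList).map (fun p => ((p.2.toNat : Int) - 65, p.1))
    -- indexed[i] and k4[p]: the index is always in range here, so pyGetD is exact
    let perm := PySem.List.sorted2 (PySem.List.pyRange 0 (PySem.Str.len extract))
        (fun i => (PySem.List.pyGetD indexed i (0, 0)).1)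
        (fun i => (PySem.List.pyGetD indexed i (0, 0)).2)
    some (String.ofList (perm.map (fun p => PySem.List.pyGetD k4.toList p 'A')))
  else if method = "rank_reverse" then
    let indexed := (PySem.List.enumerate extract.toList).map (fun p => ((p.2.toNat : Int) - 65, p.1))
    let perm := PySem.List.sorted2 (PySem.List.pyRange 0 (PySem.Str.len extract))
        (fun i => (PySem.List.pyGetD indexed i (0, 0)).1)
        (fun i => (PySem.List.pyGetD indexed i (0, 0)).2)
    -- inv_perm[p] = i: p is a valid nonnegative index, so List.set is exact
    let inv_perm := (PySem.List.enumerate perm).foldl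
        (fun acc q => acc.set q.2.toNat q.1) (List.replicate perm.length (0 : Int))
    some (String.ofList ((PySem.List.pyRange 0 (PySem.Str.len k4)).map
        (fun i => PySem.List.pyGetD k4.toList (PySem.List.pyGetD inv_perm i 0) 'A')))
  else none

-- ===== PORT B =====
def try_as_permutation_alt (extract : String) (k4 : String) (method : String) : Option String :=
  if PySem.Str.len extract ≠ PySem.Str.len k4 then none
  else if method ≠ "rank" ∧ method ≠ "rank_reverse" then none
  else
    let vals := extract.toList.map (fun c => (c.toNat : Int) - 65)
    let perm := (PySem.List.sorted (PySem.Set.ofList vals) (fun v => v)).foldl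
        (fun acc v => acc ++ (PySem.List.pyRange 0 (vals.length : Int)).filter
            (fun i => PySem.List.pyGetD vals i 0 == v)) []
    if method = "rank" then
      -- vals[i] and k4[p]: the index is always in range here, so pyGetD is exact
      some (String.ofList (perm.map (fun p => PySem.List.pyGetD k4.toList p 'A')))
    else
      -- inv_perm[p] = i: p is a valid nonnegative index, so List.set is exact
      let inv_perm := (PySem.List.enumerate perm).foldl
          (fun acc q => acc.set q.2.toNat q.1) (List.replicate perm.length (0 : Int))
      some (String.ofList ((PySem.List.pyRange 0 (PySem.Str.len k4)).map
          (fun i => PySem.List.pyGetD k4.toList (PySem.List.pyGetD inv_perm i 0) 'A')))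

-- ===== PRECONDITION & SPEC =====
def Spec_try_as_permutation (extract : String) (k4 : String) (method : String) (out : Option String) : Prop := out = try_as_permutation_alt extract k4 method
instance (extract : String) (k4 : String) (method : String) (out : Option String) : Decidable (Spec_try_as_permutation extract k4 method out) := by unfold Spec_try_as_permutation; infer_instance

-- ===== CLAIM (what is proved, stated in full; the proofs are below) =====
def Claim_equal_try_as_permutation : Prop := ∀ (extract : String) (k4 : String) (method : String), Dom_try_as_permutation extract k4 method → Spec_try_as_permutation extract k4 method (try_as_permutation extract k4 method)

-- ===== LEMMAS AND PROOFS =====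

theorem pv_insertBy_congr {α : Type} (f g : α → α → Bool) (x : α) (ys : List α)
    (h : ∀ y ∈ ys, f x y = g x y) :
    PySem.List.insertBy f x ys = PySem.List.insertBy g x ys := by
  induction ys with
  | nil => rfl
  | cons y ys ih =>
    simp only [PySem.List.insertBy]
    rw [h y (by simp)]
    cases hg : g x y with
    | true => simp
    | false =>
      simp only [Bool.false_eq_true, if_false, List.cons.injEq, true_and]
      exact ih (fun z hz => h z (by simp [hz]))

theorem pv_foldl_insertBy_congr {α : Type} (f g : α → α → Bool) (S : List α)
    (hfg : ∀ a ∈ S, ∀ b ∈ S, f a b = g a b) :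
    ∀ (xs acc : List α), (∀ x ∈ xs, x ∈ S) → (∀ x ∈ acc, x ∈ S) →
    xs.foldl (fun acc x => PySem.List.insertBy f x acc) acc
      = xs.foldl (fun acc x => PySem.List.insertBy g x acc) acc := by
  intro xs
  induction xs with
  | nil => intro acc _ _; rfl
  | cons x xs ih =>
    intro acc hxs hacc
    have hx : x ∈ S := hxs x (by simp)
    simp only [List.foldl_cons]
    rw [pv_insertBy_congr f g x acc (fun y hy => hfg x hx y (hacc y hy))]
    exact ih _ (fun z hz => hxs z (by simp [hz])) (fun z hz => by
      rcases (PySem.List.mem_insertBy g x z acc).mp hz with h | h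
      · exact h ▸ hx
      · exact hacc z h)

theorem pv_lex_lt_iff (a1 a2 b1 b2 C : Int) (ha : 0 ≤ a2) (ha' : a2 < C) (hb : 0 ≤ b2) (hb' : b2 < C) :
    (a1 * C + a2 < b1 * C + b2) ↔ (a1 < b1 ∨ (¬ b1 < a1 ∧ a2 < b2)) := by
  constructor
  · intro hl
    rcases lt_trichotomy a1 b1 with hlt | heq | hgt
    · exact Or.inl hlt
    · refine Or.inr ⟨by omega, ?_⟩
      rw [heq] at hl
      exact lt_of_add_lt_add_left hl
    · exfalso; nlinarith
  · rintro (hlt | ⟨hnl, hk2⟩)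
    · nlinarith
    · rcases eq_or_lt_of_le (not_lt.mp hnl) with heq | hlt
      · rw [heq]; linarith
      · nlinarith

theorem pv_sorted2_eq_sorted {α : Type} (xs : List α) (k1 k2 : α → Int) (C : Int)
    (h : ∀ x ∈ xs, 0 ≤ k2 x ∧ k2 x < C) :
    PySem.List.sorted2 xs k1 k2 = PySem.List.sorted xs (fun x => k1 x * C + k2 x) := by
  simp only [PySem.List.sorted2, PySem.List.sorted, if_neg (by decide : ¬ (false = true))]
  apply pv_foldl_insertBy_congr _ _ xs _ xs [] (fun x hx => hx) (by simp)
  intro a ha b hb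
  obtain ⟨h1, h2⟩ := h a ha
  obtain ⟨h3, h4⟩ := h b hb
  have := pv_lex_lt_iff (k1 a) (k2 a) (k1 b) (k2 b) C h1 h2 h3 h4
  rw [show (decide (k1 a * C + k2 a < k1 b * C + k2 b))
      = decide (k1 a < k1 b ∨ (¬ k1 b < k1 a ∧ k2 a < k2 b)) from decide_eq_decide.mpr this]
  simp [← decide_not, not_lt]

theorem pv_perm_eq (extract : String) :
    PySem.List.sorted2 (PySem.List.pyRange 0 (PySem.Str.len extract))
      (fun i => (PySem.List.pyGetD ((PySem.List.enumerate extract.toList).map (fun p => ((p.2.toNat : Int) - 65, p.1))) i ((0 : Int), (0 : Int))).1)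
      (fun i => (PySem.List.pyGetD ((PySem.List.enumerate extract.toList).map (fun p => ((p.2.toNat : Int) - 65, p.1))) i ((0 : Int), (0 : Int))).2)
    = (PySem.List.sorted (PySem.Set.ofList (extract.toList.map (fun c => (c.toNat : Int) - 65))) (fun v => v)).foldl
        (fun acc v => acc ++ (PySem.List.pyRange 0 (((extract.toList.map (fun c => (c.toNat : Int) - 65)).length : Int))).filter
            (fun i => PySem.List.pyGetD (extract.toList.map (fun c => (c.toNat : Int) - 65)) i 0 == v)) [] := by
  rw [PySem.Str.len_eq, List.length_map]
  set ext := extract.toList with hext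
  set vals := ext.map (fun c => (c.toNat : Int) - 65) with hvals
  set n : Int := (ext.length : Int) with hn
  -- A's `indexed` list is the map (fun j => (vals[j], j)) over range(n)
  have hidx : ((PySem.List.enumerate ext).map (fun p => ((p.2.toNat : Int) - 65, p.1)))
      = (PySem.List.pyRange 0 n).map (fun j => (PySem.List.pyGetD vals j 0, j)) := by
    rw [PySem.List.enumerate_eq_map_pyRange ext 'A', List.map_map, PySem.List.len_eq]
    congr 1
    funext j
    rw [hvals, show (0 : Int) = (('A'.toNat : Int) - 65) from by decide, PySem.List.pyGetD_map]
    rfl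
  rw [hidx]
  have hget : ∀ i : Int, 0 ≤ i → i < n →
      PySem.List.pyGetD ((PySem.List.pyRange 0 n).map (fun j => (PySem.List.pyGetD vals j 0, j))) i ((0:Int),(0:Int))
        = (PySem.List.pyGetD vals i 0, i) :=
    fun i h0 h1 => PySem.List.pyGetD_map_pyRange_of_nonneg _ n i _ h0 h1
  rw [pv_sorted2_eq_sorted _ _ _ n (fun i hi => by
    obtain ⟨h0, h1⟩ := PySem.List.mem_pyRange_one.mp hi
    rw [hget i h0 h1]
    exact ⟨h0, h1⟩)]
  rw [PySem.List.foldl_append_eq_flatMap, List.nil_append]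
  set key := fun i => (PySem.List.pyGetD ((PySem.List.pyRange 0 n).map (fun j => (PySem.List.pyGetD vals j 0, j))) i ((0:Int),(0:Int))).1 * n
      + (PySem.List.pyGetD ((PySem.List.pyRange 0 n).map (fun j => (PySem.List.pyGetD vals j 0, j))) i ((0:Int),(0:Int))).2 with hkey
  have hkeyval : ∀ i : Int, 0 ≤ i → i < n → key i = PySem.List.pyGetD vals i 0 * n + i := by
    intro i h0 h1
    rw [hkey]
    simp only [hget i h0 h1]
  set g := fun v => (PySem.List.pyRange 0 n).filter (fun i => PySem.List.pyGetD vals i 0 == v) with hg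
  set svals := PySem.List.sorted (PySem.Set.ofList vals) (fun v => v) with hsvals
  have hvals_len : (vals.length : Int) = n := by rw [hvals, List.length_map, hn]
  have hvalmem : ∀ i : Int, 0 ≤ i → i < n → PySem.List.pyGetD vals i 0 ∈ vals := by
    intro i h0 h1
    rw [PySem.List.pyGetD_eq_getElem vals 0 h0 (by omega)]
    exact List.getElem_mem _
  -- pairwise strict key increase on the flatMap
  have hpw : (List.flatMap g svals).Pairwise (fun a b => key a < key b) := by
    rw [List.flatMap_def, List.pairwise_flatten]
    constructor
    · intro l hl
      rw [List.mem_map] at hl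
      obtain ⟨v, hv, rfl⟩ := hl
      refine List.Pairwise.imp_of_mem ?_ ((PySem.List.pairwise_lt_pyRange_one 0 n).filter _)
      intro a b ha hb hab
      rw [hg] at ha hb
      rw [List.mem_filter] at ha hb
      obtain ⟨ha0, ha1⟩ := PySem.List.mem_pyRange_one.mp ha.1
      obtain ⟨hb0, hb1⟩ := PySem.List.mem_pyRange_one.mp hb.1
      rw [hkeyval a ha0 ha1, hkeyval b hb0 hb1,
        eq_of_beq ha.2, eq_of_beq hb.2]
      linarith
    · rw [List.pairwise_map]
      refine List.Pairwise.imp_of_mem ?_ (PySem.List.sorted_ofList_pairwise_lt vals)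
      intro v w hv hw hvw x hx y hy
      rw [hg] at hx hy
      rw [List.mem_filter] at hx hy
      obtain ⟨hx0, hx1⟩ := PySem.List.mem_pyRange_one.mp hx.1
      obtain ⟨hy0, hy1⟩ := PySem.List.mem_pyRange_one.mp hy.1
      rw [hkeyval x hx0 hx1, hkeyval y hy0 hy1, eq_of_beq hx.2, eq_of_beq hy.2]
      nlinarith
  have hnd : (List.flatMap g svals).Nodup :=
    hpw.imp (fun h heq => absurd h (by rw [heq]; exact lt_irrefl _))
  have hperm : (List.flatMap g svals).Perm (PySem.List.pyRange 0 n) := by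
    rw [List.perm_ext_iff_of_nodup hnd (PySem.List.nodup_pyRange_one 0 n)]
    intro i
    rw [List.mem_flatMap]
    constructor
    · rintro ⟨v, hv, hi⟩
      rw [hg] at hi
      exact (List.mem_filter.mp hi).1
    · intro hi
      obtain ⟨h0, h1⟩ := PySem.List.mem_pyRange_one.mp hi
      refine ⟨PySem.List.pyGetD vals i 0, ?_, ?_⟩
      · rw [hsvals, PySem.List.mem_sorted, PySem.Set.mem_ofList]
        exact hvalmem i h0 h1
      · rw [hg]
        rw [List.mem_filter]
        exact ⟨hi, beq_self_eq_true _⟩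
  exact PySem.List.sorted_eq_of_perm_of_pairwise_lt _ _ key hperm hpw


-- ===== VERDICT (by name: the statement is the Claim_ definition above) =====
theorem try_as_permutation_spec : Claim_equal_try_as_permutation := by
  intro extract k4 method _
  unfold Spec_try_as_permutation try_as_permutation try_as_permutation_alt
  by_cases hlen : PySem.Str.len extract ≠ PySem.Str.len k4
  · simp only [if_pos hlen]
  · by_cases hr : method = "rank"
    · subst hr
      simp only [if_neg hlen, ne_eq, not_true_eq_false, false_and, if_false,
        if_true]
      rw [pv_perm_eq extract]
    · by_cases hrr : method = "rank_reverse"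
      · subst hrr
        simp only [if_neg hlen, ne_eq, not_true_eq_false, and_false, if_false, if_true,
          if_neg (show ¬("rank_reverse" = "rank") from by decide)]
        rw [pv_perm_eq extract]
      · simp only [if_neg hlen, if_neg hr, if_neg hrr, ne_eq,
          if_pos (show ¬method = "rank" ∧ ¬method = "rank_reverse" from ⟨hr, hrr⟩)]
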